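-- pv_equiv track=rewrite | github.com/psheppard16/pathing | Game/drawingEngine.py | getLastBresenham
-- ===== SOURCE A (Python) =====
-- def getLastBresenham(start, end):
--     x1, y1 = start
--     x2, y2 = end
--     dx = x2 - x1
--     dy = y2 - y1
--
--     # Determine how steep the line is
--     is_steep = abs(dy) > abs(dx)
--
--     # Rotate line
--     if is_steep:
--         x1, y1, x2, y2 = y1, x1, y2, x2
--
--     # Swap start and end points if necessary and store swap state
--     if x1 > x2:
--         x1, x2, y1, y2 = x2, x1, y2, y1
--
--     # Recalculate differentials
--     dx = x2 - x1
--     dy = y2 - y1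
--
--     # Calculate error
--     error = int(dx / 2.0)
--     ystep = 1 if y1 < y2 else -1
--
--     # Iterate over bounding box generating points between start and end
--     y = y1
--     points = []
--     for x in range(x1, x2 + 1):
--         coord = (y, x) if is_steep else (x, y)
--         points.append(coord)
--
--         error -= abs(dy)
--         if error < 0:
--             y += ystep
--             error += dx
--     if points[0] == end:
--         return points[1:4]
--     elif points[0] == start:
--         return points[-5:-2]
--     raise Exception("could not find last")
-- ===== SOURCE B (Python) =====
-- def getLastBresenham(start, end):
--     x1, y1 = start
--     x2, y2 = end
--     steep = abs(y2 - y1) > abs(x2 - x1)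
--     if steep:
--         x1, y1, x2, y2 = y1, x1, y2, x2
--     if x1 > x2:
--         x1, x2, y1, y2 = x2, x1, y2, y1
--     dx = x2 - x1
--     ady = abs(y2 - y1)
--     ystep = 1 if y1 < y2 else -1
--
--     def pt(k):
--         # closed-form Bresenham: number of y-steps taken before emitting point k
--         n = 0 if dx == 0 else -((dx // 2 - k * ady) // dx)
--         return (y1 + ystep * n, x1 + k) if steep else (x1 + k, y1 + ystep * n)
--
--     L = dx + 1
--     if pt(0) == end:
--         ks = range(1, min(4, L))
--     else:
--         ks = range(max(0, L - 5), max(0, L - 2))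
--     return [pt(k) for k in ks]
-- ===== Notes on version B (the rewrite author's own statement) =====
-- stated objective: faster
-- what changed: B replaces A's full Bresenham traversal of every x in [x1,x2] with a closed-form computation (floor division) of only the at most three requested points near the relevant endpoint.
import Mathlib
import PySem

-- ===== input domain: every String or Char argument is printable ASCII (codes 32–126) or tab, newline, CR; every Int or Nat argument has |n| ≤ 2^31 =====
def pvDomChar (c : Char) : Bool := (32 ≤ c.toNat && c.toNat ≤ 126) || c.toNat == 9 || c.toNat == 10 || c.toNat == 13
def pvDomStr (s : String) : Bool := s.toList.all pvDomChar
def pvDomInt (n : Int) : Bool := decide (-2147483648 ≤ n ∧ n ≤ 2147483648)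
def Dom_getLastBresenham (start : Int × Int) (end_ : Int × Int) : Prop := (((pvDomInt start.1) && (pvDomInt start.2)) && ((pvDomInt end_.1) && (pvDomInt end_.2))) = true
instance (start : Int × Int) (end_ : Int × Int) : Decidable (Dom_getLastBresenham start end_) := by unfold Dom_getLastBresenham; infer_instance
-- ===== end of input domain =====

-- B computes the at most three requested points in closed form (floor division) instead of
-- traversing the whole Bresenham line as A does.

-- ===== PORT A =====
-- loop body of A's 'for x in range(x1, x2 + 1)': state is (y, error, points)
def aStep (isSteep : Bool) (dy dx ystep : Int)
    (st : Int × Int × Array (Int × Int)) (x : Int) : Int × Int × Array (Int × Int) :=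
  let y := st.1
  let error := st.2.1
  let points := st.2.2.push (if isSteep then (y, x) else (x, y))  -- list.append: amortized O(1), like Python
  let error := error - (dy.natAbs : Int)
  if error < 0 then (y + ystep, error + dx, points) else (y, error, points)

def getLastBresenham (start : Int × Int) (end_ : Int × Int) : List (Int × Int) :=
  let x1 := start.1
  let y1 := start.2
  let x2 := end_.1
  let y2 := end_.2
  let dx := x2 - x1
  let dy := y2 - y1
  let isSteep : Bool := dy.natAbs > dx.natAbs
  let (x1, y1, x2, y2) := if isSteep then (y1, x1, y2, x2) else (x1, y1, x2, y2)
  let (x1, x2, y1, y2) := if x1 > x2 then (x2, x1, y2, y1) else (x1, x2, y1, y2)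
  let dx := x2 - x1
  let dy := y2 - y1
  -- int(dx / 2.0): exact here, since 0 ≤ dx ≤ 2^32 < 2^53, so it equals dx // 2
  let error := PySem.Int.floordiv dx 2
  let ystep : Int := if y1 < y2 then 1 else -1
  let points :=
    ((PySem.List.pyRange x1 (x2 + 1) 1).foldl (aStep isSteep dy dx ystep) (y1, error, #[])).2.2.toList
  if PySem.List.pyGet? points 0 = some end_ then PySem.List.slice points (some 1) (some 4)
  else if PySem.List.pyGet? points 0 = some start then PySem.List.slice points (some (-5)) (some (-2))
  else []  -- unreachable: points[0] is always start or end_; Python raises here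

-- ===== PORT B =====
-- closed-form point k of the (transformed) Bresenham line
def bresPt (steep : Bool) (x1 y1 dx ady ystep k : Int) : Int × Int :=
  let n : Int :=
    if dx = 0 then 0
    else -(PySem.Int.floordiv (PySem.Int.floordiv dx 2 - k * ady) dx)
  if steep then (y1 + ystep * n, x1 + k) else (x1 + k, y1 + ystep * n)

def getLastBresenham_alt (start : Int × Int) (end_ : Int × Int) : List (Int × Int) :=
  let x1 := start.1
  let y1 := start.2
  let x2 := end_.1
  let y2 := end_.2
  let steep : Bool := (y2 - y1).natAbs > (x2 - x1).natAbs
  let (x1, y1, x2, y2) := if steep then (y1, x1, y2, x2) else (x1, y1, x2, y2)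
  let (x1, x2, y1, y2) := if x1 > x2 then (x2, x1, y2, y1) else (x1, x2, y1, y2)
  let dx := x2 - x1
  let ady : Int := (y2 - y1).natAbs
  let ystep : Int := if y1 < y2 then 1 else -1
  let L := dx + 1
  let ks :=
    if bresPt steep x1 y1 dx ady ystep 0 = end_ then PySem.List.pyRange 1 (min 4 L) 1
    else PySem.List.pyRange (max 0 (L - 5)) (max 0 (L - 2)) 1
  ks.map (bresPt steep x1 y1 dx ady ystep)

-- ===== PRECONDITION & SPEC =====
def Spec_getLastBresenham (start : Int × Int) (end_ : Int × Int) (out : List (Int × Int)) : Prop := out = getLastBresenham_alt start end_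
instance (start : Int × Int) (end_ : Int × Int) (out : List (Int × Int)) : Decidable (Spec_getLastBresenham start end_ out) := by unfold Spec_getLastBresenham; infer_instance

-- ===== CLAIM (what is proved, stated in full; the proofs are below) =====
def Claim_equal_getLastBresenham : Prop := ∀ (start : Int × Int) (end_ : Int × Int), Dom_getLastBresenham start end_ → Spec_getLastBresenham start end_ (getLastBresenham start end_)

-- ===== LEMMAS AND PROOFS =====

theorem step_div (dx ady k : Int) (hdx : 0 < dx) (ha1 : ady ≤ dx)
    (hneg : (dx/2 - k*ady) % dx - ady < 0) :
    (dx/2 - (k+1)*ady) % dx = (dx/2 - k*ady) % dx - ady + dx ∧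
    (dx/2 - (k+1)*ady) / dx = (dx/2 - k*ady) / dx - 1 := by
  have hd := Int.mul_ediv_add_emod (dx/2 - k*ady) dx
  have h0 : 0 ≤ (dx/2 - k*ady) % dx := Int.emod_nonneg _ (ne_of_gt hdx)
  have h1 : (dx/2 - k*ady) % dx < dx := Int.emod_lt_of_pos _ hdx
  have key : dx/2 - (k+1)*ady = ((dx/2 - k*ady) % dx - ady + dx) + ((dx/2 - k*ady)/dx - 1) * dx := by
    linear_combination -hd
  constructor
  · rw [key, Int.add_mul_emod_self_right]
    exact Int.emod_eq_of_lt (by omega) (by omega)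
  · rw [key, Int.add_mul_ediv_right _ _ (ne_of_gt hdx),
      Int.ediv_eq_zero_of_lt (by omega) (by omega)]
    ring
theorem step_div' (dx ady k : Int) (hdx : 0 < dx) (ha0 : 0 ≤ ady)
    (hpos : 0 ≤ (dx/2 - k*ady) % dx - ady) :
    (dx/2 - (k+1)*ady) % dx = (dx/2 - k*ady) % dx - ady ∧
    (dx/2 - (k+1)*ady) / dx = (dx/2 - k*ady) / dx := by
  have hd := Int.mul_ediv_add_emod (dx/2 - k*ady) dx
  have h1 : (dx/2 - k*ady) % dx < dx := Int.emod_lt_of_pos _ hdx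
  have key : dx/2 - (k+1)*ady = ((dx/2 - k*ady) % dx - ady) + ((dx/2 - k*ady)/dx) * dx := by
    linear_combination -hd
  constructor
  · rw [key, Int.add_mul_emod_self_right]
    exact Int.emod_eq_of_lt (by omega) (by omega)
  · rw [key, Int.add_mul_ediv_right _ _ (ne_of_gt hdx),
      Int.ediv_eq_zero_of_lt (by omega) (by omega)]
    ring

theorem bresPt_of_pos (steep : Bool) (x1 y1 dx ady ystep k : Int) (hdx : 0 < dx) :
    bresPt steep x1 y1 dx ady ystep k =
      (if steep then ((y1 + ystep * (-((dx/2 - k*ady)/dx)), x1 + k) : Int × Int)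
       else (x1 + k, y1 + ystep * (-((dx/2 - k*ady)/dx)))) := by
  rw [bresPt]
  simp only [PySem.Int.floordiv_eq_ediv_of_pos hdx,
    PySem.Int.floordiv_eq_ediv_of_pos (show (0:Int) < 2 by norm_num), if_neg (ne_of_gt hdx)]

theorem loop_inv (steep : Bool) (dy dx ystep x1 y1 : Int) (hdx : 0 < dx)
    (hady : (dy.natAbs : Int) ≤ dx) :
    ∀ (m : Nat) (k : Int) (acc : Array (Int × Int)), 0 ≤ k → k + m = dx + 1 →
    (List.foldl (aStep steep dy dx ystep)
        (y1 + ystep * (-((dx/2 - k*(dy.natAbs:Int))/dx)),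
         (dx/2 - k*(dy.natAbs:Int)) % dx, acc)
        (PySem.List.pyRange (x1 + k) (x1 + dx + 1) 1)).2.2.toList
      = acc.toList ++ (List.range m).map (fun (j : Nat) => bresPt steep x1 y1 dx (dy.natAbs:Int) ystep (k + (j:Int))) := by
  intro m
  induction m with
  | zero =>
    intro k acc hk hm
    rw [PySem.List.pyRange_one_eq_nil (by omega)]
    simp
  | succ m ih =>
    intro k acc hk hm
    rw [PySem.List.pyRange_one_cons (by omega), List.foldl_cons]
    have harr : x1 + k + 1 = x1 + (k+1) := by ring
    set ady : Int := (dy.natAbs : Int) with hady'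
    have ha0 : 0 ≤ ady := by positivity
    have hstep : aStep steep dy dx ystep
        (y1 + ystep * (-((dx/2 - k*ady)/dx)), (dx/2 - k*ady) % dx, acc) (x1 + k)
      = (y1 + ystep * (-((dx/2 - (k+1)*ady)/dx)), (dx/2 - (k+1)*ady) % dx,
         acc.push (bresPt steep x1 y1 dx ady ystep k)) := by
      rw [aStep, bresPt_of_pos _ _ _ _ _ _ _ hdx]
      simp only [← hady']
      by_cases hneg : (dx/2 - k*ady) % dx - ady < 0
      · obtain ⟨he, hq⟩ := step_div dx ady k hdx hady hneg
        rw [if_pos hneg]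
        exact Prod.ext (by simp only [hq]; ring) (Prod.ext (by simp only [he]) rfl)
      · obtain ⟨he, hq⟩ := step_div' dx ady k hdx ha0 (by omega)
        rw [if_neg hneg]
        simp only [he, hq]
    rw [hstep, harr, ih (k+1) (acc.push (bresPt steep x1 y1 dx ady ystep k)) (by omega) (by omega)]
    rw [Array.toList_push, List.range_succ_eq_map, List.map_cons, List.map_map, List.append_assoc,
      ← List.singleton_append]
    have hhead : bresPt steep x1 y1 dx ady ystep (k + ((0:Nat):Int)) = bresPt steep x1 y1 dx ady ystep k := by norm_num
    rw [hhead]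
    simp only [List.append_nil, List.cons_append, List.nil_append]
    refine congrArg (acc.toList ++ ·) (congrArg (List.cons _) ?_)
    refine List.map_congr_left fun a _ => ?_
    simp only [Function.comp_apply]
    congr 1
    push_cast
    ring

theorem sliceA (f : Int → Int × Int) (N : Nat) (dx : Int) (hN : (N : Int) = dx + 1) :
    PySem.List.slice ((List.range N).map (fun (j : Nat) => f (j : Int))) (some 1) (some 4)
      = (PySem.List.pyRange 1 (min 4 (dx + 1)) 1).map f := by
  rw [PySem.List.slice, PySem.List.pyRange_one]
  have hc1 : PySem.List.clampIdx ((List.range N).map (fun (j : Nat) => f (j : Int))).length (1:Int) = min 1 N := by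
    simp only [List.length_map, List.length_range]
    exact_mod_cast PySem.List.clampIdx_natCast N 1
  have hc4 : PySem.List.clampIdx ((List.range N).map (fun (j : Nat) => f (j : Int))).length (4:Int) = min 4 N := by
    simp only [List.length_map, List.length_range]
    exact_mod_cast PySem.List.clampIdx_natCast N 4
  simp only [hc1, hc4]
  apply List.ext_getElem
  · simp
    omega
  · intro i h1 h2
    simp only [List.getElem_take, List.getElem_drop, List.getElem_map, List.getElem_range]
    congr 1
    simp only [List.length_take, List.length_drop, List.length_map, List.length_range] at h1 h2
    push_cast
    omega

theorem sliceB (f : Int → Int × Int) (N : Nat) (dx : Int) (hN : (N : Int) = dx + 1) :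
    PySem.List.slice ((List.range N).map (fun (j : Nat) => f (j : Int))) (some (-5)) (some (-2))
      = (PySem.List.pyRange (max 0 (dx + 1 - 5)) (max 0 (dx + 1 - 2)) 1).map f := by
  rw [PySem.List.slice, PySem.List.pyRange_one]
  simp only [PySem.List.clampIdx_neg_ofNat _ 5 (by norm_num), PySem.List.clampIdx_neg_ofNat _ 2 (by norm_num),
    List.length_map, List.length_range]
  apply List.ext_getElem
  · simp
    omega
  · intro i h1 h2
    simp only [List.getElem_take, List.getElem_drop, List.getElem_map, List.getElem_range]
    congr 1
    simp only [List.length_take, List.length_drop, List.length_map, List.length_range] at h1 h2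
    push_cast
    omega
theorem points_eq (steep : Bool) (x1 y1 x2 y2 ystep : Int)
    (hle : x1 ≤ x2) (hady : ((y2 - y1).natAbs : Int) ≤ x2 - x1) :
    ((PySem.List.pyRange x1 (x2 + 1) 1).foldl
        (aStep steep (y2 - y1) (x2 - x1) ystep)
        (y1, PySem.Int.floordiv (x2 - x1) 2, #[])).2.2.toList
      = (List.range (x2 + 1 - x1).toNat).map
          (fun (j : Nat) => bresPt steep x1 y1 (x2 - x1) ((y2 - y1).natAbs : Int) ystep (j : Int)) := by
  set dx : Int := x2 - x1 with hdx'
  set ady : Int := ((y2 - y1).natAbs : Int) with hady'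
  rcases lt_or_eq_of_le (show (0:Int) ≤ dx by omega) with hdx | hdx
  · -- dx > 0
    have h2 : PySem.Int.floordiv dx 2 = dx / 2 :=
      PySem.Int.floordiv_eq_ediv_of_pos (by norm_num)
    have hinit1 : y1 = y1 + ystep * (-((dx/2 - 0*ady)/dx)) := by
      rw [Int.zero_mul, Int.sub_zero,
        Int.ediv_eq_zero_of_lt (Int.ediv_nonneg (le_of_lt hdx) (by norm_num)) (by omega)]
      ring
    have hinit2 : PySem.Int.floordiv dx 2 = (dx/2 - 0*ady) % dx := by
      rw [h2, Int.zero_mul, Int.sub_zero,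
        Int.emod_eq_of_lt (Int.ediv_nonneg (le_of_lt hdx) (by norm_num)) (by omega)]
    have hrange : PySem.List.pyRange x1 (x2 + 1) 1 = PySem.List.pyRange (x1 + 0) (x1 + dx + 1) 1 := by
      congr 1 <;> omega
    rw [hrange]
    rw [show ((y1, PySem.Int.floordiv dx 2, (#[] : Array (Int × Int)))
          = (y1 + ystep * (-((dx/2 - 0*ady)/dx)), (dx/2 - 0*ady) % dx, (#[] : Array (Int × Int)))) from by
      rw [← hinit1, ← hinit2]]
    rw [loop_inv steep (y2 - y1) dx ystep x1 y1 hdx (by rw [← hady']; exact hady) (dx + 1).toNat 0 #[]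
      le_rfl (by omega)]
    simp only [List.nil_append]
    have hNN : (dx + 1).toNat = (x2 + 1 - x1).toNat := by omega
    rw [hNN]
    apply List.map_congr_left
    intro a _
    congr 1
    omega
  · -- dx = 0
    have hdx0 : dx = 0 := hdx.symm
    have hx : x2 = x1 := by omega
    have hady0 : ady = 0 := by
      have : (0:Int) ≤ ady := by positivity
      omega
    have hr : PySem.List.pyRange x1 (x2 + 1) 1 = [x1] := by
      rw [PySem.List.pyRange_one_cons (by omega), PySem.List.pyRange_one_eq_nil (by omega)]
    rw [hr]
    have hN : (x2 + 1 - x1).toNat = 1 := by omega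
    rw [hN]
    simp only [List.foldl_cons, List.foldl_nil, List.range_one, List.map_cons, List.map_nil]
    rw [aStep, bresPt]
    have hnab : ((y2 - y1).natAbs : Int) = 0 := by rw [← hady']; exact hady0
    simp only [hdx0, ← hady', hady0]
    norm_num
theorem bresPt_zero (steep : Bool) (x1 y1 dx ady ystep : Int) (hdx : 0 ≤ dx) :
    bresPt steep x1 y1 dx ady ystep 0 = if steep then ((y1, x1) : Int × Int) else (x1, y1) := by
  rw [bresPt]
  by_cases h : dx = 0
  · simp [h]
  · have hpos : 0 < dx := lt_of_le_of_ne hdx (Ne.symm h)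
    have e2 : PySem.Int.floordiv (PySem.Int.floordiv dx 2 - 0 * ady) dx = 0 := by
      rw [PySem.Int.floordiv_eq_ediv_of_pos hpos,
        PySem.Int.floordiv_eq_ediv_of_pos (show (0:Int) < 2 by norm_num), Int.zero_mul, Int.sub_zero]
      exact Int.ediv_eq_zero_of_lt (Int.ediv_nonneg hdx (by norm_num)) (by omega)
    rw [if_neg h, e2]
    simp

theorem core (steep : Bool) (x1 y1 x2 y2 : Int) (start end_ : Int × Int)
    (hle : x1 ≤ x2)
    (hady : ((y2 - y1).natAbs : Int) ≤ x2 - x1)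
    (hp0 : (if steep then ((y1, x1) : Int × Int) else (x1, y1)) = start ∨
           (if steep then ((y1, x1) : Int × Int) else (x1, y1)) = end_) :
    (let points :=
      ((PySem.List.pyRange x1 (x2 + 1) 1).foldl
        (aStep steep (y2 - y1) (x2 - x1) (if y1 < y2 then 1 else -1))
        (y1, PySem.Int.floordiv (x2 - x1) 2, #[])).2.2.toList
     if PySem.List.pyGet? points 0 = some end_ then PySem.List.slice points (some 1) (some 4)
     else if PySem.List.pyGet? points 0 = some start then PySem.List.slice points (some (-5)) (some (-2))
     else [])
    =
    ((if bresPt steep x1 y1 (x2 - x1) ((y2 - y1).natAbs : Int) (if y1 < y2 then 1 else -1) 0 = end_ then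
        PySem.List.pyRange 1 (min 4 ((x2 - x1) + 1)) 1
      else
        PySem.List.pyRange (max 0 ((x2 - x1) + 1 - 5)) (max 0 ((x2 - x1) + 1 - 2)) 1).map
       (bresPt steep x1 y1 (x2 - x1) ((y2 - y1).natAbs : Int) (if y1 < y2 then 1 else -1))) := by
  simp only []
  rw [points_eq steep x1 y1 x2 y2 _ hle hady]
  set ystep : Int := if y1 < y2 then (1:Int) else -1 with hystep
  set dx : Int := x2 - x1 with hdx'
  set ady : Int := ((y2 - y1).natAbs : Int) with hady'
  set g : Nat → Int × Int := fun (j : Nat) => bresPt steep x1 y1 dx ady ystep (j : Int) with hg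
  set N : Nat := (x2 + 1 - x1).toNat with hN'
  have hN : (N : Int) = dx + 1 := by omega
  have hcons : (List.range N).map g = g 0 :: ((List.range (N-1)).map (fun j => g (j+1))) := by
    rw [show N = (N-1)+1 by omega, List.range_succ_eq_map, List.map_cons, List.map_map]
    rfl
  have hp0get : PySem.List.pyGet? ((List.range N).map g) 0 = some (g 0) := by
    rw [hcons]; exact PySem.List.pyGet?_zero_cons _ _
  have hg0 : g 0 = bresPt steep x1 y1 dx ady ystep 0 := by
    rw [hg]; norm_num
  by_cases hb : bresPt steep x1 y1 dx ady ystep 0 = end_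
  · rw [if_pos (by rw [hp0get, hg0, hb]), if_pos hb]
    exact sliceA _ N dx hN
  · rw [if_neg (by rw [hp0get, hg0]; exact fun h => hb (Option.some_injective _ h)), if_neg hb]
    have hz := bresPt_zero steep x1 y1 dx ady ystep (by omega)
    have hstart : (if steep then ((y1, x1) : Int × Int) else (x1, y1)) = start := by
      rcases hp0 with h | h
      · exact h
      · exact absurd (hz.trans h) hb
    rw [if_pos (by rw [hp0get, hg0, hz, hstart])]
    exact sliceB _ N dx hN

-- ===== VERDICT (by name: the statement is the Claim_ definition above) =====
theorem getLastBresenham_spec : Claim_equal_getLastBresenham := by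
  intro start end_ _
  unfold Spec_getLastBresenham
  obtain ⟨x1, y1⟩ := start
  obtain ⟨x2, y2⟩ := end_
  simp only [getLastBresenham, getLastBresenham_alt]
  by_cases hs : (y2 - y1).natAbs > (x2 - x1).natAbs
  · simp only [hs, decide_true, if_true]
    by_cases hsw : y1 > y2
    · simp only [if_pos hsw]
      exact core true y2 x2 y1 x1 (x1, y1) (x2, y2) (by omega) (by omega)
        (Or.inr (by simp))
    · simp only [if_neg hsw]
      exact core true y1 x1 y2 x2 (x1, y1) (x2, y2) (by omega) (by omega)
        (Or.inl (by simp))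
  · simp only [hs, decide_false, Bool.false_eq_true, if_false]
    by_cases hsw : x1 > x2
    · simp only [if_pos hsw]
      exact core false x2 y2 x1 y1 (x1, y1) (x2, y2) (by omega) (by omega)
        (Or.inr (by simp))
    · simp only [if_neg hsw]
      exact core false x1 y1 x2 y2 (x1, y1) (x2, y2) (by omega) (by omega)
        (Or.inl (by simp))
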